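-- pv_equiv track=rewrite | github.com/Kattusite/linguistics-db | src/web/handlers.py | _extract_query_specs
-- ===== SOURCE A (Python) =====
-- from collections.abc import (
--     Sequence,
-- )
-- import itertools
-- from typing import (
--     Any,
--     Dict,
--     List,
--     NoReturn,
--     Tuple,
--     Union,
-- )
--
-- Token = Tuple[str, str]
--
-- QuerySpec = Sequence[Token]
--
-- def _extract_query_specs(tokens: Sequence[Token]) -> Sequence[QuerySpec]:
--     """Split the input Sequence[Token] into a Sequence[QuerySpec].
--
--     Arguments:
--         tokens: a single sequence of tokens, delimited by ('Query', ...) tokens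
--
--     Returns:
--         a sequence of QuerySpec objects.
--         The sequence contains one item per Query included in the request,
--         and that item will have the full list of Tokens associated with that query.
--     """
--     # Now we split on each 'Query' token to create a list of QuerySpec objects.
--     def is_query_token(token: Token):
--         key, _value = token
--         return key == 'Query'
--
--     # NOTE: By this logic, the Query= for the initial query is optional.
--     #   Thus, it is perfectly valid for the leading Query= to be omitted.
--     #   However, subsequent Query= tokens are required, as they delimit adjacent queries.
--     query_specs: Tuple[QuerySpec] = tuple([
--         # Extract each group as a tuple ...
--         tuple(group)
--         # ... Using tokens where `is_query_token() == True` as a group delimiter ...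
--         for is_delimiter, group in itertools.groupby(tokens, key=is_query_token)
--         # ... dropping from the output any group which is just a delimiting query token.
--         if not is_delimiter
--     ])
--
--     return query_specs
-- ===== SOURCE B (Python) =====
-- def _extract_query_specs(tokens):
--     """Split the input token sequence into query specs, using ('Query', ...)
--     tokens as delimiters; empty groups (leading/adjacent/trailing delimiters)
--     produce no output."""
--     result = []
--     current = []
--     for token in tokens:
--         key, _value = token
--         if key == 'Query':
--             if current:
--                 result.append(tuple(current))
--             current = []
--         else:
--             current.append(token)
--     if current:
--         result.append(tuple(current))
--     return tuple(result)
-- ===== Notes on version B (the rewrite author's own statement) =====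
-- stated objective: simpler
-- what changed: Replaced itertools.groupby (runs keyed by is_query_token, then a comprehension dropping delimiter runs) with a single explicit accumulator loop that flushes the current group on each delimiter token.
import Mathlib
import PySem

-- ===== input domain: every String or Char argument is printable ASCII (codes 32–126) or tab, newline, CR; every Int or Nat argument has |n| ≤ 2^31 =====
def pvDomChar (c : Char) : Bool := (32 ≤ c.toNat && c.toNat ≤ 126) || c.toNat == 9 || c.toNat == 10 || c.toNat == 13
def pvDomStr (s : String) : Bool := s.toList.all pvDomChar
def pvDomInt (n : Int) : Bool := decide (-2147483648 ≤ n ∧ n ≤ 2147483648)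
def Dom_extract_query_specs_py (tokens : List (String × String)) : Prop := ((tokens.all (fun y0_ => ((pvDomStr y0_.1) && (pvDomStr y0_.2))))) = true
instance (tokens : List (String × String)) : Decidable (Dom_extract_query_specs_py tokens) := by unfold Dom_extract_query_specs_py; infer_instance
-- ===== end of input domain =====

-- B replaces itertools.groupby with one explicit accumulator loop; objective: simpler.

-- ===== PORT A =====
-- is_query_token: unpack the pair, compare the key with 'Query'
def pvIsQueryToken (token : String × String) : Bool := token.1 == "Query"

-- longest prefix whose key-value equals k, plus the remainder (the engine of itertools.groupby)
def pvTakeRun (k : Bool) : List (String × String) → List (String × String) × List (String × String)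
  | [] => ([], [])
  | t :: ts =>
    if pvIsQueryToken t = k then
      ((pvTakeRun k ts).1.cons t, (pvTakeRun k ts).2)
    else ([], t :: ts)

theorem pvTakeRun_len (k : Bool) (ts : List (String × String)) :
    (pvTakeRun k ts).2.length ≤ ts.length := by
  induction ts with
  | nil => simp [pvTakeRun]
  | cons t ts ih =>
    simp only [pvTakeRun]
    split
    · exact Nat.le_succ_of_le ih
    · simp

-- itertools.groupby(tokens, key=is_query_token): list of (key, run) pairs
def pvGroupby : List (String × String) → List (Bool × List (String × String))
  | [] => []
  | t :: ts =>
    (pvIsQueryToken t, t :: (pvTakeRun (pvIsQueryToken t) ts).1)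
      :: pvGroupby (pvTakeRun (pvIsQueryToken t) ts).2
termination_by l => l.length
decreasing_by
  exact Nat.lt_succ_of_le (pvTakeRun_len _ _)

-- the comprehension: keep each group whose key is false
def extract_query_specs_py (tokens : List (String × String)) : List (List (String × String)) :=
  (pvGroupby tokens).filterMap (fun g => if g.1 then none else some g.2)

-- ===== PORT B =====
-- explicit loop with `result` and `current` accumulators, flushing on each delimiter
def pvAltLoop (res : List (List (String × String))) (cur : List (String × String)) :
    List (String × String) → List (List (String × String))
  | [] => if cur.isEmpty then res else res ++ [cur]
  | t :: ts =>
    if t.1 == "Query" then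
      pvAltLoop (if cur.isEmpty then res else res ++ [cur]) [] ts
    else
      pvAltLoop res (cur ++ [t]) ts

def extract_query_specs_py_alt (tokens : List (String × String)) : List (List (String × String)) :=
  pvAltLoop [] [] tokens

-- ===== PRECONDITION & SPEC =====
def Spec_extract_query_specs_py (tokens : List (String × String)) (out : List (List (String × String))) : Prop := out = extract_query_specs_py_alt tokens
instance (tokens : List (String × String)) (out : List (List (String × String))) : Decidable (Spec_extract_query_specs_py tokens out) := by unfold Spec_extract_query_specs_py; infer_instance

-- ===== CLAIM (what is proved, stated in full; the proofs are below) =====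
def Claim_equal_extract_query_specs_py : Prop := ∀ (tokens : List (String × String)), Dom_extract_query_specs_py tokens → Spec_extract_query_specs_py tokens (extract_query_specs_py tokens)

-- ===== LEMMAS AND PROOFS =====

-- a leading delimiter contributes nothing to A's output
theorem pvDropDelim (t : String × String) (ts : List (String × String))
    (h : pvIsQueryToken t = true) :
    extract_query_specs_py (t :: ts) = extract_query_specs_py ts := by
  cases ts with
  | nil => simp [extract_query_specs_py, pvGroupby, pvTakeRun, h]
  | cons u ts' =>
    by_cases hu : pvIsQueryToken u = true
    · simp [extract_query_specs_py, pvGroupby, pvTakeRun, h, hu]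
    · simp [extract_query_specs_py, pvGroupby, pvTakeRun, h,
        Bool.eq_false_iff.mpr hu]

-- the run taken from an all-non-delimiter prefix followed by a delimiter (or nothing) is exactly that prefix
theorem pvTakeRun_prefix (cs rest : List (String × String))
    (hcs : ∀ t ∈ cs, pvIsQueryToken t = false)
    (hrest : rest = [] ∨ ∃ u rest', rest = u :: rest' ∧ pvIsQueryToken u = true) :
    pvTakeRun false (cs ++ rest) = (cs, rest) := by
  induction cs with
  | nil =>
    rcases hrest with h | ⟨u, rest', rfl, hu⟩
    · simp [h, pvTakeRun]
    · simp [pvTakeRun, hu]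
  | cons c cs ih =>
    have hc : pvIsQueryToken c = false := hcs c (by simp)
    simp only [List.cons_append, pvTakeRun, hc]
    rw [ih (fun t ht => hcs t (by simp [ht]))]
    simp

-- A's output on a non-empty non-delimiter prefix followed by a delimiter (or end of input)
theorem pvFirstGroup (c : String × String) (cs rest : List (String × String))
    (hcs : ∀ t ∈ c :: cs, pvIsQueryToken t = false)
    (hrest : rest = [] ∨ ∃ u rest', rest = u :: rest' ∧ pvIsQueryToken u = true) :
    extract_query_specs_py (c :: cs ++ rest) = (c :: cs) :: extract_query_specs_py rest := by
  have hc : pvIsQueryToken c = false := hcs c (by simp)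
  have hspan := pvTakeRun_prefix cs rest (fun t ht => hcs t (by simp [ht])) hrest
  simp only [extract_query_specs_py, List.cons_append, pvGroupby, hc, hspan]
  simp

-- accumulated `res` factors out of the loop
theorem pvAltLoop_res (ts : List (String × String)) :
    ∀ res cur, pvAltLoop res cur ts = res ++ pvAltLoop [] cur ts := by
  induction ts with
  | nil =>
    intro res cur
    by_cases h : cur.isEmpty <;> simp [pvAltLoop, h]
  | cons t ts ih =>
    intro res cur
    by_cases hq : (t.1 == "Query") = true
    · by_cases h : cur.isEmpty
      · simp only [pvAltLoop, hq, if_true, h]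
        exact ih res []
      · simp only [pvAltLoop, hq, if_true, if_neg h, List.nil_append]
        rw [ih (res ++ [cur]), ih [cur], List.append_assoc]
    · simp only [pvAltLoop, if_neg hq]
      exact ih res (cur ++ [t])

-- main invariant: the loop with pending group `cur` (all non-delimiters) computes A on `cur ++ ts`
theorem pvLoop_invariant (ts : List (String × String)) :
    ∀ cur, (∀ t ∈ cur, pvIsQueryToken t = false) →
      pvAltLoop [] cur ts = extract_query_specs_py (cur ++ ts) := by
  induction ts with
  | nil =>
    intro cur hcur
    cases cur with
    | nil => simp [pvAltLoop, extract_query_specs_py, pvGroupby]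
    | cons c cs =>
      have hc : pvIsQueryToken c = false := hcur c (by simp)
      have hspan := pvTakeRun_prefix cs [] (fun t ht => hcur t (by simp [ht])) (Or.inl rfl)
      simp only [List.append_nil] at hspan ⊢
      simp [pvAltLoop, extract_query_specs_py, pvGroupby, hc, hspan]
  | cons t ts ih =>
    intro cur hcur
    by_cases hq : pvIsQueryToken t = true
    · have hq' : (t.1 == "Query") = true := hq
      cases cur with
      | nil =>
        simp only [pvAltLoop, hq', List.isEmpty_nil, if_true, List.nil_append]
        rw [ih [] (by simp), pvDropDelim t ts hq]
        simp
      | cons c cs =>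
        simp only [pvAltLoop, hq', if_true, List.isEmpty_cons]
        rw [if_neg (by simp)]
        rw [pvAltLoop_res, ih [] (by simp),
          pvFirstGroup c cs (t :: ts) hcur (Or.inr ⟨t, ts, rfl, hq⟩),
          pvDropDelim t ts hq]
        simp
    · have hq' : (t.1 == "Query") = false := by
        simpa [pvIsQueryToken] using hq
      have hcur' : ∀ u ∈ cur ++ [t], pvIsQueryToken u = false := by
        intro u hu
        rcases List.mem_append.mp hu with h | h
        · exact hcur u h
        · simp at h; subst h; exact hq'
      simp only [pvAltLoop, hq', Bool.false_eq_true, if_false]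
      rw [ih (cur ++ [t]) hcur']
      simp

-- ===== VERDICT (by name: the statement is the Claim_ definition above) =====
theorem extract_query_specs_py_spec : Claim_equal_extract_query_specs_py := by
  intro tokens _
  unfold Spec_extract_query_specs_py extract_query_specs_py_alt
  rw [pvLoop_invariant tokens [] (by simp)]
  simp
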